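-- pv_equiv track=rewrite | github.com/jcorbin/alphahack | strkit.py | spliterate
-- ===== SOURCE A (Python) =====
-- def partition_any(s: str, chars: str):
--     for char in chars:
--         i = s.find(char)
--         if i >= 0:
--             return s[:i], s[i], s[i+1:]
--     return  s, '', ''
--
-- def spliterate(s: str, chars: str, trim: bool = False):
--     fin = ''
--     while s:
--         part, fin, s = partition_any(s, chars)
--         if trim and not part: continue
--         yield part
--         break
--     while s:
--         part, fin, s = partition_any(s, chars)
--         yield part
--     if not trim and fin: yield ''
-- ===== SOURCE B (Python) =====
-- def spliterate(s: str, chars: str, trim: bool = False):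
--     # One str.split pass per priority level instead of rescanning the suffix per part:
--     # the first delimiter present consumes all its occurrences at once; only the last
--     # segment can still contain lower-priority delimiters, recurse on it.
--     if not s:
--         return
--     def go(cs, t):
--         for i, c in enumerate(cs):
--             if c in t:
--                 segs = t.split(c)
--                 rest, tfin = go(cs[i+1:], segs[-1])
--                 return segs[:-1] + rest, tfin
--         return [], t
--     parts, tfin = go(chars, s)
--     if tfin:
--         parts.append(tfin)
--     if trim:
--         k = 0
--         while k < len(parts) and not parts[k]:
--             k += 1
--         parts = parts[k:]
--     elif not tfin:
--         parts.append('')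
--     yield from parts
-- ===== Notes on version B (the rewrite author's own statement) =====
-- stated objective: faster
-- what changed: Instead of re-running partition_any (find each delimiter char, slice) once per emitted part over the shrinking suffix, B does a single str.split per priority level: the first delimiter char present consumes all its occurrences at once, and only the last segment (which cannot contain that char or any higher-priority one) is processed recursively with the remaining lower-priority chars; trim and the trailing-empty rule are applied to the assembled part list.
import Mathlib
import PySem

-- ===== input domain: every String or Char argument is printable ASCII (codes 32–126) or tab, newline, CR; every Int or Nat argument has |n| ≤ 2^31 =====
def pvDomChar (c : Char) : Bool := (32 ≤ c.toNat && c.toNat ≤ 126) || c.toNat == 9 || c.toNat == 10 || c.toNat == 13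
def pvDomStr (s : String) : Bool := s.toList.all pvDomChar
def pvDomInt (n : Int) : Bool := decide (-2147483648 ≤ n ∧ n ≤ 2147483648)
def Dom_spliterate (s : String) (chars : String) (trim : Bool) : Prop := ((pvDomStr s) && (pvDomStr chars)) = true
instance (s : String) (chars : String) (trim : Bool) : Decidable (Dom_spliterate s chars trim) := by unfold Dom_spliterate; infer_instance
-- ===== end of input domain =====

-- B replaces A's per-part rescan (partition_any + slicing of the shrinking suffix, once per
-- emitted part) by one split per priority level; objective: faster (asymptotic).

-- ===== PORT A =====

-- s.find(char) for a single char: first index, or -1 if absent (exact)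
def pyFindChar : List Char → Char → Int
  | [], _ => -1
  | x :: xs, c => if x = c then 0 else
      let r := pyFindChar xs c
      if r < 0 then -1 else r + 1

-- partition_any: for char in chars: i = s.find(char); if i >= 0: return s[:i], s[i], s[i+1:]
-- (0 ≤ i < len(s) in that branch, so take/drop are exact for these slices and s[i] = char)
def partAny (s : List Char) : List Char → List Char × List Char × List Char
  | [] => (s, [], [])
  | c :: rest =>
      let i := pyFindChar s c
      if i ≥ 0 then (s.take i.toNat, [c], s.drop (i.toNat + 1)) else partAny s rest

theorem partAny_third_len (s : List Char) (cs : List Char) (hs : s ≠ []) :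
    (partAny s cs).2.2.length < s.length := by
  induction cs with
  | nil => simpa using List.length_pos_iff.mpr hs
  | cons c rest ih =>
      simp only [partAny]
      split
      · simp only [List.length_drop]
        have : 0 < s.length := List.length_pos_iff.mpr hs
        omega
      · exact ih

-- first while loop: with trim, skip empty parts; yield the first kept part, then stop.
-- returns (yielded parts (0 or 1), fin, remaining s)
def loopA1 (s : List Char) (cs : List Char) (trim : Bool) (fin : List Char) :
    List (List Char) × List Char × List Char :=
  if hs : s = [] then ([], fin, s)
  else
    let r := partAny s cs
    if trim && r.1.isEmpty then loopA1 r.2.2 cs trim r.2.1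
    else ([r.1], r.2.1, r.2.2)
termination_by s.length
decreasing_by exact partAny_third_len s cs hs

-- second while loop: yield every part; returns (yielded parts, final fin)
def loopA2 (s : List Char) (cs : List Char) (fin : List Char) :
    List (List Char) × List Char :=
  if hs : s = [] then ([], fin)
  else
    let r := partAny s cs
    let t := loopA2 r.2.2 cs r.2.1
    (r.1 :: t.1, t.2)
termination_by s.length
decreasing_by exact partAny_third_len s cs hs

def spliterate (s : String) (chars : String) (trim : Bool) : List String :=
  let r1 := loopA1 s.toList chars.toList trim []
  let r2 := loopA2 r1.2.2 chars.toList r1.2.1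
  let base := r1.1 ++ r2.1
  let base := if !trim && r2.2 ≠ [] then base ++ [[]] else base
  base.map (fun l => String.mk l)

-- ===== PORT B =====

-- t.split(c) for a single char c, exact (Python: ''.split(c) = [''], here ([], []));
-- returned directly as (segs[:-1], segs[-1]) since Source B only uses those two pieces
def pySplit1 : List Char → Char → List (List Char) × List Char
  | [], _ => ([], [])
  | x :: xs, c =>
      let r := pySplit1 xs c
      if x = c then ([] :: r.1, r.2)
      else
        match r with
        | ([], last) => ([], x :: last)
        | (seg :: rest, last) => ((x :: seg) :: rest, last)

-- go(cs, t): for i, c in enumerate(cs): if c in t: split on c, recurse on (cs[i+1:], segs[-1])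
def goB : List Char → List Char → List (List Char) × List Char
  | [], t => ([], t)
  | c :: cs, t =>
      if t.contains c then
        let r := pySplit1 t c
        let g := goB cs r.2
        (r.1 ++ g.1, g.2)
      else goB cs t

-- Source B's trimming while-loop: drop the leading empty parts
def dropEmpties : List (List Char) → List (List Char)
  | [] => []
  | p :: rest => if p = [] then dropEmpties rest else p :: rest

def spliterate_alt (s : String) (chars : String) (trim : Bool) : List String :=
  if s.toList = [] then []
  else
    let g := goB chars.toList s.toList
    let parts := g.1 ++ (if g.2 ≠ [] then [g.2] else [])
    let out := if trim then dropEmpties parts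
               else if g.2 = [] then parts ++ [[]] else parts
    out.map (fun l => String.mk l)

-- ===== PRECONDITION & SPEC =====
def Spec_spliterate (s : String) (chars : String) (trim : Bool) (out : List String) : Prop := out = spliterate_alt s chars trim
instance (s : String) (chars : String) (trim : Bool) (out : List String) : Decidable (Spec_spliterate s chars trim out) := by unfold Spec_spliterate; infer_instance

-- ===== CLAIM (what is proved, stated in full; the proofs are below) =====
def Claim_equal_spliterate : Prop := ∀ (s : String) (chars : String) (trim : Bool), Dom_spliterate s chars trim → Spec_spliterate s chars trim (spliterate s chars trim)

-- ===== LEMMAS AND PROOFS =====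

-- step equations for the two A-loops
theorem loopA2_nil (cs f : List Char) : loopA2 [] cs f = ([], f) := by
  rw [loopA2]; simp

theorem loopA2_cons (s cs f : List Char) (hs : s ≠ []) :
    loopA2 s cs f =
      ((partAny s cs).1 :: (loopA2 (partAny s cs).2.2 cs (partAny s cs).2.1).1,
       (loopA2 (partAny s cs).2.2 cs (partAny s cs).2.1).2) := by
  rw [loopA2]; simp [dif_neg hs]

theorem loopA1_nil (cs : List Char) (trim : Bool) (f : List Char) :
    loopA1 [] cs trim f = ([], f, []) := by
  rw [loopA1]; simp

theorem loopA1_cons_skip (s cs f : List Char) (trim : Bool) (hs : s ≠ [])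
    (h : (trim && (partAny s cs).1.isEmpty) = true) :
    loopA1 s cs trim f = loopA1 (partAny s cs).2.2 cs trim (partAny s cs).2.1 := by
  rw [loopA1]; simp only [dif_neg hs, h, if_pos]

theorem loopA1_cons_yield (s cs f : List Char) (trim : Bool) (hs : s ≠ [])
    (h : ¬ (trim && (partAny s cs).1.isEmpty) = true) :
    loopA1 s cs trim f = ([(partAny s cs).1], (partAny s cs).2.1, (partAny s cs).2.2) := by
  rw [loopA1]; simp only [dif_neg hs, h, if_false, Bool.false_eq_true]

theorem pyFindChar_neg_iff (s : List Char) (c : Char) :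
    pyFindChar s c < 0 ↔ c ∉ s := by
  induction s with
  | nil => simp [pyFindChar]
  | cons x xs ih =>
      by_cases hx : x = c
      · subst hx; simp [pyFindChar]
      · have hne : c ≠ x := fun e => hx e.symm
        by_cases hm : c ∈ xs
        · have hnl : ¬ pyFindChar xs c < 0 := fun hh => (ih.mp hh) hm
          simp only [pyFindChar, if_neg hx, if_neg hnl, List.mem_cons, not_or]
          constructor
          · intro hlt; exact absurd hlt (by omega)
          · rintro ⟨-, hq⟩; exact absurd hm hq
        · have h0 : pyFindChar xs c < 0 := ih.mpr hm
          simp only [pyFindChar, if_neg hx, if_pos h0, List.mem_cons, not_or]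
          constructor
          · intro _; exact ⟨hne, hm⟩
          · intro _; omega

theorem partAny_skip (s : List Char) (c : Char) (cs : List Char) (h : c ∉ s) :
    partAny s (c :: cs) = partAny s cs := by
  have : pyFindChar s c < 0 := (pyFindChar_neg_iff s c).mpr h
  simp only [partAny]
  rw [if_neg (by omega)]

theorem partAny_hit (s : List Char) (c : Char) (cs : List Char) (h : c ∈ s) :
    partAny s (c :: cs) =
      (s.take (pyFindChar s c).toNat, [c], s.drop ((pyFindChar s c).toNat + 1)) := by
  have : ¬ pyFindChar s c < 0 := by rw [pyFindChar_neg_iff]; simpa using h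
  simp only [partAny]
  rw [if_pos (by omega)]

-- pySplit1 when c does not occur: no split, last segment is s itself
theorem pySplit1_no_occ (s : List Char) (c : Char) (h : c ∉ s) :
    pySplit1 s c = ([], s) := by
  induction s with
  | nil => rfl
  | cons x xs ih =>
      simp only [List.mem_cons, not_or] at h
      simp only [pySplit1, ih h.2]
      rw [if_neg (fun e => h.1 e.symm)]

-- pySplit1 unfolded at the first occurrence of c
theorem pySplit1_step (s : List Char) (c : Char) (h : c ∈ s) :
    pySplit1 s c =
      ((s.take (pyFindChar s c).toNat) :: (pySplit1 (s.drop ((pyFindChar s c).toNat + 1)) c).1,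
       (pySplit1 (s.drop ((pyFindChar s c).toNat + 1)) c).2) := by
  induction s with
  | nil => cases h
  | cons x xs ih =>
      by_cases hx : x = c
      · subst hx
        simp [pySplit1, pyFindChar]
      · have hmem : c ∈ xs := by
          rcases List.mem_cons.mp h with h' | h'
          · exact absurd h'.symm hx
          · exact h' 
        have hnn : ¬ pyFindChar xs c < 0 := by
          rw [pyFindChar_neg_iff]; simpa using hmem
        have htn : (pyFindChar xs c + 1).toNat = (pyFindChar xs c).toNat + 1 := by omega
        simp only [pyFindChar, if_neg hx, if_neg hnn, htn]
        rw [List.take_succ_cons, List.drop_succ_cons]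
        simp only [pySplit1, if_neg hx]
        rw [ih hmem]

theorem pySplit1_last_not_mem (s : List Char) (c : Char) :
    c ∉ (pySplit1 s c).2 := by
  induction hn : s.length using Nat.strong_induction_on generalizing s with
  | _ n ih =>
      by_cases h : c ∈ s
      · rw [pySplit1_step s c h]
        have hdrop : (s.drop ((pyFindChar s c).toNat + 1)).length < s.length := by
          have : s ≠ [] := by rintro rfl; cases h
          have : 0 < s.length := List.length_pos_iff.mpr this
          simp only [List.length_drop]; omega
        exact ih _ (hn ▸ hdrop) (s.drop ((pyFindChar s c).toNat + 1)) rfl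
      · rw [pySplit1_no_occ s c h]; exact h

-- a character absent from s is absent from any suffix produced along the way
theorem not_mem_of_suffix {s t : List Char} {c : Char} (h : t <:+ s) (hc : c ∉ s) :
    c ∉ t := fun hm => hc (h.subset hm)

-- loopA2's part list does not depend on the incoming fin, and for nonempty s neither does its fin
theorem loopA2_indep (s cs : List Char) (f g : List Char) :
    (loopA2 s cs f).1 = (loopA2 s cs g).1 ∧ (s ≠ [] → (loopA2 s cs f).2 = (loopA2 s cs g).2) := by
  by_cases hs : s = []
  · subst hs
    rw [loopA2_nil, loopA2_nil]
    exact ⟨rfl, fun h => absurd rfl h⟩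
  · rw [loopA2_cons s cs f hs, loopA2_cons s cs g hs]
    exact ⟨rfl, fun _ => rfl⟩

-- with c absent from s the whole second loop ignores c
theorem loopA2_skip (s : List Char) (c : Char) (cs : List Char) (f : List Char) (h : c ∉ s) :
    loopA2 s (c :: cs) f = loopA2 s cs f := by
  induction hn : s.length using Nat.strong_induction_on generalizing s f with
  | _ n ih =>
      by_cases hs : s = []
      · subst hs; rw [loopA2_nil, loopA2_nil]
      · rw [loopA2_cons s (c :: cs) f hs, loopA2_cons s cs f hs, partAny_skip s c cs h]
        have hsuf : (partAny s cs).2.2 <:+ s := by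
          clear hn ih
          induction cs with
          | nil => exact List.nil_suffix
          | cons d rest ih2 =>
              simp only [partAny]
              split
              · exact List.drop_suffix _ s
              · exact ih2
        have hlen := partAny_third_len s cs hs
        rw [ih _ (hn ▸ hlen) _ (partAny s cs).2.1 (not_mem_of_suffix hsuf h) rfl]

-- peel all splits on c (present in s) at once
theorem loopA2_peel (s : List Char) (c : Char) (cs : List Char) (f : List Char) (h : c ∈ s) :
    loopA2 s (c :: cs) f =
      ((pySplit1 s c).1 ++ (loopA2 (pySplit1 s c).2 (c :: cs) [c]).1,
       (loopA2 (pySplit1 s c).2 (c :: cs) [c]).2) := by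
  induction hn : s.length using Nat.strong_induction_on generalizing s f with
  | _ n ih =>
      have hs : s ≠ [] := by rintro rfl; cases h
      rw [loopA2_cons s (c :: cs) f hs, partAny_hit s c cs h]
      rw [pySplit1_step s c h]
      by_cases hd : c ∈ s.drop ((pyFindChar s c).toNat + 1)
      · have hlen : (s.drop ((pyFindChar s c).toNat + 1)).length < s.length := by
          have : 0 < s.length := List.length_pos_iff.mpr hs
          simp only [List.length_drop]; omega
        rw [ih _ (hn ▸ hlen) _ [c] hd rfl]
        simp
      · rw [pySplit1_no_occ _ c hd]
        simp

theorem goB_nil (cs : List Char) : goB cs [] = ([], []) := by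
  induction cs with
  | nil => rfl
  | cons c cs ih => simpa [goB] using ih

-- MAIN: loopA2 computes goB's parts followed by the nonempty last segment, and its fin
-- is empty exactly when goB's final segment is nonempty (for nonempty s)
theorem loopA2_eq_goB (cs s : List Char) :
    (loopA2 s cs []).1 = (goB cs s).1 ++ (if (goB cs s).2 ≠ [] then [(goB cs s).2] else [])
    ∧ (s ≠ [] → ((loopA2 s cs []).2 = [] ↔ (goB cs s).2 ≠ [])) := by
  induction cs generalizing s with
  | nil =>
      by_cases hs : s = []
      · subst hs
        rw [loopA2_nil]
        simp [goB]
      · rw [loopA2_cons s [] [] hs]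
        simp only [partAny, loopA2_nil, goB]
        simp [hs]
  | cons c cs ih =>
      by_cases hc : c ∈ s
      · have hs : s ≠ [] := by rintro rfl; cases hc
        have hcont : s.contains c = true := by simpa using hc
        have hnm := pySplit1_last_not_mem s c
        rw [loopA2_peel s c cs [] hc, loopA2_skip _ c cs [c] hnm]
        simp only [goB, if_pos hcont]
        by_cases hr : (pySplit1 s c).2 = []
        · rw [hr, loopA2_nil, goB_nil]
          simp
        · have hind := loopA2_indep (pySplit1 s c).2 cs [c] []
          constructor
          · rw [hind.1, (ih (pySplit1 s c).2).1]
            simp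
          · intro _
            rw [hind.2 hr]
            exact (ih (pySplit1 s c).2).2 hr
      · have hcont : s.contains c = false := by simpa using hc
        rw [loopA2_skip s c cs [] hc]
        simp only [goB, hcont, Bool.false_eq_true, if_false]
        exact ih s

-- first loop with trim = false: one unrolling of loopA2
theorem loopA1_false (s cs : List Char) (f : List Char) :
    (loopA1 s cs false f).1 ++ (loopA2 (loopA1 s cs false f).2.2 cs (loopA1 s cs false f).2.1).1
      = (loopA2 s cs f).1
    ∧ (loopA2 (loopA1 s cs false f).2.2 cs (loopA1 s cs false f).2.1).2 = (loopA2 s cs f).2 := by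
  by_cases hs : s = []
  · subst hs
    rw [loopA1_nil, loopA2_nil]
    simp
  · rw [loopA1_cons_yield s cs f false hs (by simp), loopA2_cons s cs f hs]
    simp

-- first loop with trim = true: dropEmpties of the full part list
theorem loopA1_true (s cs : List Char) (f : List Char) :
    (loopA1 s cs true f).1 ++ (loopA2 (loopA1 s cs true f).2.2 cs (loopA1 s cs true f).2.1).1
      = dropEmpties (loopA2 s cs f).1 := by
  induction hn : s.length using Nat.strong_induction_on generalizing s f with
  | _ n ih =>
      by_cases hs : s = []
      · subst hs
        rw [loopA1_nil, loopA2_nil]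
        simp [dropEmpties]
      · have hlen := partAny_third_len s cs hs
        rw [loopA2_cons s cs f hs]
        by_cases hp : (partAny s cs).1 = []
        · rw [loopA1_cons_skip s cs f true hs (by simp [hp])]
          rw [ih _ (hn ▸ hlen) _ (partAny s cs).2.1 rfl]
          simp [dropEmpties, hp]
        · rw [loopA1_cons_yield s cs f true hs (by simp [List.isEmpty_iff, hp])]
          simp only [dropEmpties, if_neg hp]
          simp

-- ===== VERDICT (by name: the statement is the Claim_ definition above) =====
theorem spliterate_spec : Claim_equal_spliterate := by
  unfold Claim_equal_spliterate
  intro s chars trim _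
  unfold Spec_spliterate
  simp only [spliterate, spliterate_alt]
  by_cases hs : s.toList = []
  · rw [if_pos hs, hs, loopA1_nil, loopA2_nil]
    simp
  · rw [if_neg hs]
    obtain ⟨g1, g2⟩ := loopA2_eq_goB chars.toList s.toList
    cases trim with
    | false =>
        obtain ⟨h1, h2⟩ := loopA1_false s.toList chars.toList []
        have hbase :
            (loopA1 s.toList chars.toList false []).1 ++
              (loopA2 (loopA1 s.toList chars.toList false []).2.2 chars.toList
                (loopA1 s.toList chars.toList false []).2.1).1
            = (goB chars.toList s.toList).1 ++
              (if (goB chars.toList s.toList).2 ≠ [] then [(goB chars.toList s.toList).2] else []) := by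
          rw [h1, g1]
        have hcond :
            ((loopA2 (loopA1 s.toList chars.toList false []).2.2 chars.toList
                (loopA1 s.toList chars.toList false []).2.1).2 ≠ [])
            ↔ (goB chars.toList s.toList).2 = [] := by
          rw [h2]
          have := g2 hs
          tauto
        by_cases hg : (goB chars.toList s.toList).2 = []
        · rw [if_pos (by simp [hcond.mpr hg]), if_pos hg, hbase]
          simp
        · have hcn : ¬ ((loopA2 (loopA1 s.toList chars.toList false []).2.2 chars.toList
                (loopA1 s.toList chars.toList false []).2.1).2 ≠ []) :=
            fun hx => hg (hcond.mp hx)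
          rw [if_neg (by simpa using hcn), if_neg hg, hbase]
          simp
    | true =>
        rw [if_neg (by simp), if_pos rfl]
        rw [loopA1_true s.toList chars.toList [], g1]
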